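-- pv_equiv track=rewrite | github.com/rodrigopolastro/maratona-interfatecs | problemas-resolvidos/2ª Fase/Problemas_2015/c_crush.py | encontraSequenciaEmLista2
-- ===== SOURCE A (Python) =====
-- def encontraSequenciaEmLista2(lista):
--     pecaAnterior = None
--     posicoesSequencia = []
--
--     for j, pecaAtual in enumerate(lista):
--         if pecaAtual == '.':
--             if len(posicoesSequencia) >= 3:
--                 break
--             pecaAnterior = None
--             posicoesSequencia = []
--
--         if pecaAtual == pecaAnterior:
--             posicoesSequencia.append(j)
--         else:
--             if len(posicoesSequencia) >= 3:
--                 break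
--             pecaAnterior = pecaAtual
--             posicoesSequencia = [j]
--
--     return posicoesSequencia
-- ===== SOURCE B (Python) =====
-- def encontraSequenciaEmLista2(lista):
--     # Pass 1: build the list of maximal runs of equal pieces; '.' never merges
--     # (each '.' is its own singleton run).
--     runs = []
--     for j, x in enumerate(lista):
--         if runs and x != '.' and runs[-1][0] == x:
--             runs[-1][1].append(j)
--         else:
--             runs.append([x, [j]])
--     # Pass 2: first run of length >= 3; otherwise the last run; [] if empty.
--     for _, idxs in runs:
--         if len(idxs) >= 3:
--             return idxs
--     return runs[-1][1] if runs else []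
-- ===== Notes on version B (the rewrite author's own statement) =====
-- stated objective: alternative
-- what changed: Replaces A's single stateful scan (previous-piece variable, in-place resets and break) by a two-pass decomposition: first build the list of maximal runs of equal pieces (with '.' forced to singleton runs), then select the first run of length >= 3, falling back to the last run.
import Mathlib
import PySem

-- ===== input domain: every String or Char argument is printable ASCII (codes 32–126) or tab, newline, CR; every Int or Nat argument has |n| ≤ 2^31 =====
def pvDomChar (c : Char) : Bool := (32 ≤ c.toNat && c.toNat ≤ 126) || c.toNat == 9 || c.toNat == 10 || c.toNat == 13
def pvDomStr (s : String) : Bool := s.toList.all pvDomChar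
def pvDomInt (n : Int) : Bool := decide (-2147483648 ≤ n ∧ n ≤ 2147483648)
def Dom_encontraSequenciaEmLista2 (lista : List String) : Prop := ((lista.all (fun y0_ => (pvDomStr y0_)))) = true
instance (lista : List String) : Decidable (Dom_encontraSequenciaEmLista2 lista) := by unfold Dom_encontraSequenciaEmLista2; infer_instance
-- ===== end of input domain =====

-- B replaces A's single stateful break-out scan by two passes (build maximal runs, then select
-- the first run of length ≥ 3, falling back to the last run); objective: a clearer decomposition.

-- ===== PORT A =====
-- Literal port of A's loop: state = (index j, pecaAnterior, posicoesSequencia); 'break' returns pos.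
-- The '.' branch either breaks or resets (prev := none, pos := []); control then falls through to
-- the second if, exactly as in the Python.
def goA : List String → Int → Option String → List Int → List Int
  | [], _, _, pos => pos
  | x :: rest, j, prev, pos =>
      let st : Option (Option String × List Int) :=
        if x = "." then
          if pos.length ≥ 3 then none          -- break
          else some (none, ([] : List Int))    -- reset
        else some (prev, pos)
      match st with
      | none => pos
      | some (prev, pos) =>
        if some x = prev then goA rest (j + 1) prev (pos ++ [j])
        else if pos.length ≥ 3 then pos
        else goA rest (j + 1) (some x) [j]

def encontraSequenciaEmLista2 (lista : List String) : List Int :=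
  goA lista 0 none []

-- ===== PORT B =====
-- runs[-1][1].append(j) on the association list of runs
def appendToLast : List (String × List Int) → Int → List (String × List Int)
  | [], _ => []
  | [(v, idxs)], j => [(v, idxs ++ [j])]
  | r :: rs, j => r :: appendToLast rs j

-- one step of Source B's first loop
def stepB (runs : List (String × List Int)) (j : Int) (x : String) : List (String × List Int) :=
  match runs.getLast? with
  | some (v, _) => if x ≠ "." ∧ v = x then appendToLast runs j else runs ++ [(x, [j])]
  | none => runs ++ [(x, [j])]

-- Source B's second loop: first run with len(idxs) >= 3
def findRun : List (String × List Int) → Option (List Int)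
  | [] => none
  | (_, idxs) :: rs => if idxs.length ≥ 3 then some idxs else findRun rs

def encontraSequenciaEmLista2_alt (lista : List String) : List Int :=
  let runs := (PySem.List.enumerate lista).foldl (fun rs jx => stepB rs jx.1 jx.2) []
  match findRun runs with
  | some idxs => idxs
  | none =>
    match runs.getLast? with
    | some (_, idxs) => idxs
    | none => []

-- ===== PRECONDITION & SPEC =====
def Spec_encontraSequenciaEmLista2 (lista : List String) (out : List Int) : Prop := out = encontraSequenciaEmLista2_alt lista
instance (lista : List String) (out : List Int) : Decidable (Spec_encontraSequenciaEmLista2 lista out) := by unfold Spec_encontraSequenciaEmLista2; infer_instance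

-- ===== CLAIM (what is proved, stated in full; the proofs are below) =====
def Claim_equal_encontraSequenciaEmLista2 : Prop := ∀ (lista : List String), Dom_encontraSequenciaEmLista2 lista → Spec_encontraSequenciaEmLista2 lista (encontraSequenciaEmLista2 lista)

-- ===== LEMMAS AND PROOFS =====

-- recursive characterisation of the runs built by Source B's first loop, given a current open run (v, idxs)
def runsAux : List String → Int → String → List Int → List (String × List Int)
  | [], _, v, idxs => [(v, idxs)]
  | x :: rest, j, v, idxs =>
    if x ≠ "." ∧ v = x then runsAux rest (j + 1) v (idxs ++ [j])
    else (v, idxs) :: runsAux rest (j + 1) x [j]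

theorem appendToLast_append (pref : List (String × List Int)) (v : String) (idxs : List Int) (j : Int) :
    appendToLast (pref ++ [(v, idxs)]) j = pref ++ [(v, idxs ++ [j])] := by
  induction pref with
  | nil => simp [appendToLast]
  | cons r rs ih =>
    cases rs with
    | nil => simp [appendToLast]
    | cons r' rs' => simpa [appendToLast] using ih

theorem foldl_stepB_eq (rest : List String) :
    ∀ (j : Int) (pref : List (String × List Int)) (v : String) (idxs : List Int),
    (PySem.List.enumerate rest j).foldl (fun rs jx => stepB rs jx.1 jx.2) (pref ++ [(v, idxs)])
      = pref ++ runsAux rest j v idxs := by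
  induction rest with
  | nil => intro j pref v idxs; simp [PySem.List.enumerate_nil, runsAux]
  | cons x rest ih =>
    intro j pref v idxs
    rw [PySem.List.enumerate_cons]
    simp only [List.foldl_cons]
    by_cases h : x ≠ "." ∧ v = x
    · have hs : stepB (pref ++ [(v, idxs)]) j x = pref ++ [(v, idxs ++ [j])] := by
        simp [stepB, h, appendToLast_append]
      rw [hs, ih, runsAux, if_pos h]
    · have hs : stepB (pref ++ [(v, idxs)]) j x = (pref ++ [(v, idxs)]) ++ [(x, [j])] := by
        cases hl : (pref ++ [(v, idxs)]).getLast? with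
        | none => simp at hl
        | some p =>
          obtain rfl : (v, idxs) = p := by simpa using hl
          simp [stepB, hl, h]
      rw [hs]
      rw [show (pref ++ [(v, idxs)]) ++ [(x, [j])] = (pref ++ [(v, idxs)]) ++ [(x, [j])] from rfl]
      rw [ih, runsAux, if_neg h]
      simp
theorem runsAux_ne_nil (rest : List String) (j : Int) (v : String) (idxs : List Int) :
    runsAux rest j v idxs ≠ [] := by
  cases rest with
  | nil => simp [runsAux]
  | cons x r =>
    unfold runsAux
    split <;> first | exact runsAux_ne_nil _ _ _ _ | simp

-- Source B's selection (second loop + fallback) applied to the runs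
def selectB (runs : List (String × List Int)) : List Int :=
  match findRun runs with
  | some idxs => idxs
  | none =>
    match runs.getLast? with
    | some (_, idxs) => idxs
    | none => []

theorem selectB_cons (v : String) (idxs : List Int) (rs : List (String × List Int)) (hrs : rs ≠ []) :
    selectB ((v, idxs) :: rs) = if idxs.length ≥ 3 then idxs else selectB rs := by
  by_cases h : idxs.length ≥ 3
  · simp [selectB, findRun, h]
  · simp only [selectB, findRun, if_neg h]
    cases hf : findRun rs with
    | some l => simp
    | none =>
      cases rs with
      | nil => exact absurd rfl hrs
      | cons r rs' => simp [List.getLast?_cons_cons]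

-- main invariant: A's loop from state (prev = some v, pos = idxs) computes Source B's selection of runsAux
theorem goA_eq_selectB (rest : List String) :
    ∀ (j : Int) (v : String) (idxs : List Int),
    goA rest j (some v) idxs = selectB (runsAux rest j v idxs) := by
  induction rest with
  | nil =>
    intro j v idxs
    by_cases h : idxs.length ≥ 3 <;> simp [goA, runsAux, selectB, findRun, h]
  | cons x rest ih =>
    intro j v idxs
    by_cases hd : x = "."
    · subst hd
      by_cases h3 : idxs.length ≥ 3
      · have : ¬ ((".":String) ≠ "." ∧ v = ".") := by simp
        rw [runsAux, if_neg this,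
            selectB_cons _ _ _ (runsAux_ne_nil _ _ _ _), if_pos h3]
        simp [goA, h3]
      · have : ¬ ((".":String) ≠ "." ∧ v = ".") := by simp
        rw [runsAux, if_neg this,
            selectB_cons _ _ _ (runsAux_ne_nil _ _ _ _), if_neg h3]
        rw [show goA ("." :: rest) j (some v) idxs = goA rest (j + 1) (some ".") [j] by
          simp [goA, h3]]
        exact ih _ _ _
    · by_cases he : v = x
      · subst he
        rw [runsAux, if_pos ⟨hd, rfl⟩]
        rw [show goA (v :: rest) j (some v) idxs = goA rest (j + 1) (some v) (idxs ++ [j]) by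
          simp [goA, hd]]
        exact ih _ _ _
      · have hne : ¬ (x ≠ "." ∧ v = x) := by simp [he]
        have hxv : ¬ x = v := fun h => he h.symm
        rw [runsAux, if_neg hne, selectB_cons _ _ _ (runsAux_ne_nil _ _ _ _)]
        by_cases h3 : idxs.length ≥ 3
        · rw [if_pos h3]
          simp [goA, hd, h3, hxv]
        · rw [if_neg h3]
          rw [show goA (x :: rest) j (some v) idxs = goA rest (j + 1) (some x) [j] by
            simp [goA, hd, h3, hxv]]
          exact ih _ _ _

-- ===== VERDICT (by name: the statement is the Claim_ definition above) =====
theorem encontraSequenciaEmLista2_spec : Claim_equal_encontraSequenciaEmLista2 := by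
  intro lista _
  show encontraSequenciaEmLista2 lista = encontraSequenciaEmLista2_alt lista
  cases lista with
  | nil => rfl
  | cons x rest =>
    have hB : encontraSequenciaEmLista2_alt (x :: rest) = selectB (runsAux rest 1 x [0]) := by
      show selectB ((PySem.List.enumerate (x :: rest) 0).foldl
          (fun rs jx => stepB rs jx.1 jx.2) []) = _
      rw [PySem.List.enumerate_cons]
      simp only [List.foldl_cons]
      have h0 : stepB [] 0 x = [] ++ [(x, [(0:Int)])] := by simp [stepB]
      rw [h0, foldl_stepB_eq]
      simp
    have hA : encontraSequenciaEmLista2 (x :: rest) = goA rest 1 (some x) [0] := by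
      show goA (x :: rest) 0 none [] = _
      by_cases hd : x = "." <;> simp [goA, hd]
    rw [hA, hB, goA_eq_selectB]
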